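-- pv_equiv track=rewrite | github.com/aitoralmeida/c4a_activity_recognition | new-experiments/activity_change_recognition/unsupervised/likelihood/activity_change_recognition_RuLSIF.py | extract_features_from_sensors
-- ===== SOURCE A (Python) =====
-- def extract_features_from_sensors(actions, unique_actions, all_actions, position, timestamps, all_timestamps):
--     features_from_sensors = []
--
--     # count of events for each sensor in window
--     for action in unique_actions:
--         counter = 0
--         for action_fired in actions:
--             if action == action_fired:
--                 counter += 1
--         features_from_sensors.append(counter)
--
--     # elapsed time for each sensor since last event
--     found_actions = []
--     counter = position
--     for action in unique_actions:
--         while(counter > 0):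
--             if action == all_actions[counter]:
--                 found_actions.append(action)
--                 features_from_sensors.append(timestamps[len(timestamps)-1] - all_timestamps[counter])
--                 break
--             counter -= 1
--         if action not in found_actions:
--             features_from_sensors.append(all_timestamps[len(all_timestamps)-1] - all_timestamps[0]) # maximun time possible
--         counter = position
--
--     return features_from_sensors
-- ===== SOURCE B (Python) =====
-- def extract_features_from_sensors(actions, unique_actions, all_actions, position, timestamps, all_timestamps):
--     # Scatter strategy: assign each distinct unique action a slot (its first position in
--     # unique_actions), then fill fixed-size count/elapsed arrays with single passes over
--     # the data streams instead of scanning the data once per unique action.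
--     slot = {}
--     for j, u in enumerate(unique_actions):
--         slot.setdefault(u, j)
--     n = len(unique_actions)
--     counts = [0] * n
--     for a in actions:
--         j = slot.get(a)
--         if j is not None:
--             counts[j] += 1
--     if n == 0:
--         return []
--     maxv = all_timestamps[-1] - all_timestamps[0]
--     elapsed = [maxv] * n
--     for i in range(1, position + 1):
--         j = slot.get(all_actions[i])
--         if j is not None:
--             elapsed[j] = timestamps[-1] - all_timestamps[i]
--     return [counts[slot[u]] for u in unique_actions] + [elapsed[slot[u]] for u in unique_actions]
-- ===== Notes on version B (the rewrite author's own statement) =====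
-- stated objective: faster
-- what changed: Inverts the loop structure: instead of scanning the data once per unique action (A's gather), B assigns each distinct unique action a slot index and scatters single passes over actions and over indices 1..position into preallocated count/elapsed arrays (overwrite = last event), then reads the arrays out.
-- outside the precondition, e.g. on extract_features_from_sensors([], ['x'], ['a', 'b'], 1, [], [5, 9]): A returns [0, 4], B returns [0, 4]; on extract_features_from_sensors(['b'], ['b'], ['a', 'b', 'a'], 2, [3], [0, 1]): A returns [1, 2], B returns [1, 2]
import Mathlib
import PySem

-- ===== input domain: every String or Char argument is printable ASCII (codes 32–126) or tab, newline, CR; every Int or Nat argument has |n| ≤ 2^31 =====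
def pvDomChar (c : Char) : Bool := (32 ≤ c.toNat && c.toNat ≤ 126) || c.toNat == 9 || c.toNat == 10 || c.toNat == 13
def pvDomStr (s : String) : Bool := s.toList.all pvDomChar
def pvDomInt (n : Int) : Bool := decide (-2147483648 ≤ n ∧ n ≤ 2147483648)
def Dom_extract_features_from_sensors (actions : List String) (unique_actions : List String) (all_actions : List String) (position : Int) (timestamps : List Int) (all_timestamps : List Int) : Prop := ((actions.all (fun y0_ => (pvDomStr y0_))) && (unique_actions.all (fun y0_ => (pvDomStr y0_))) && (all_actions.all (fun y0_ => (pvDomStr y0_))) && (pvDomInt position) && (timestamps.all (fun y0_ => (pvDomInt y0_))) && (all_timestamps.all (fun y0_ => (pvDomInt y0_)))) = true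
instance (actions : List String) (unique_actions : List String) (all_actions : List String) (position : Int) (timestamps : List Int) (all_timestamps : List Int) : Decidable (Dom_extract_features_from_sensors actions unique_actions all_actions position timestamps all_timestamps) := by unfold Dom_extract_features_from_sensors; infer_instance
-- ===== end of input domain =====

-- B inverts A's loop structure: instead of scanning the data once per unique action, it gives each
-- distinct unique action a slot index and scatters single passes over the data into preallocated
-- count/elapsed arrays (faster; equivalence proved on Pre_).

-- ===== PORT A =====
-- A's inner 'while counter > 0: if action == all_actions[counter]: …break; counter -= 1', returning the
-- index where it broke (if any); indexing via List.pyGetD with default "" — Pre_ keeps the index in range.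
def pvWhileFind (all_actions : List String) (action : String) : Nat → Option Nat
  | 0 => none
  | k + 1 =>
    if action == PySem.List.pyGetD all_actions ((k : Int) + 1) "" then some (k + 1)
    else pvWhileFind all_actions action k

def extract_features_from_sensors (actions : List String) (unique_actions : List String) (all_actions : List String) (position : Int) (timestamps : List Int) (all_timestamps : List Int) : List Int :=
  -- count of events for each sensor in window
  let features_from_sensors : List Int :=
    unique_actions.foldl (fun fs action =>
      fs ++ [actions.foldl (fun counter action_fired =>
               if action == action_fired then counter + 1 else counter) (0 : Int)]) []
  -- elapsed time for each sensor since last event; counter starts at position each round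
  -- (while counter > 0 never fires for position ≤ 0, so toNat is exact)
  let res :=
    unique_actions.foldl (fun (st : List Int × List String) action =>
      let st' :=
        match pvWhileFind all_actions action position.toNat with
        | some i =>
          (st.1 ++ [PySem.List.pyGetD timestamps ((timestamps.length : Int) - 1) 0
                      - PySem.List.pyGetD all_timestamps ((i : Nat) : Int) 0],
           st.2 ++ [action])
        | none => st
      if st'.2.contains action then st'
      else (st'.1 ++ [PySem.List.pyGetD all_timestamps ((all_timestamps.length : Int) - 1) 0
                        - PySem.List.pyGetD all_timestamps 0 0], st'.2)) (features_from_sensors, [])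
  res.1

-- ===== PORT B =====
-- slot.setdefault(u, j); counts[j] += 1 / elapsed[j] = … via pySetD with pyGetD (exact: every slot
-- value j satisfies 0 ≤ j < len(unique_actions)); the final gathers counts[slot[u]] use getD with an
-- unreachable default (u ∈ unique_actions, so slot contains u and the index is in range).
def extract_features_from_sensors_alt (actions : List String) (unique_actions : List String) (all_actions : List String) (position : Int) (timestamps : List Int) (all_timestamps : List Int) : List Int :=
  let slot : PySem.Dict String Int :=
    (PySem.List.enumerate unique_actions 0).foldl (fun d p => d.setdefault p.2 p.1) PySem.Dict.empty
  let n := unique_actions.length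
  let counts : List Int :=
    actions.foldl (fun cs a =>
      match slot.get? a with
      | none => cs
      | some j => PySem.List.pySetD cs j (PySem.List.pyGetD cs j 0 + 1)) (List.replicate n 0)
  if n = 0 then []
  else
    let maxv := PySem.List.pyGetD all_timestamps (-1) 0 - PySem.List.pyGetD all_timestamps 0 0
    let elapsed : List Int :=
      (PySem.List.pyRange 1 (position + 1) 1).foldl (fun es i =>
        match slot.get? (PySem.List.pyGetD all_actions i "") with
        | none => es
        | some j => PySem.List.pySetD es j
            (PySem.List.pyGetD timestamps (-1) 0 - PySem.List.pyGetD all_timestamps i 0))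
        (List.replicate n maxv)
    unique_actions.map (fun u => PySem.List.pyGetD counts (slot.getD u 0) 0)
      ++ unique_actions.map (fun u => PySem.List.pyGetD elapsed (slot.getD u 0) 0)

-- ===== PRECONDITION & SPEC =====
-- Pre_ excludes the inputs where A's indexing raises (empty timestamp lists when a branch reads them,
-- position out of range of all_actions/all_timestamps while positive); it is slightly conservative: it
-- also drops some returning inputs (e.g. empty timestamps with no action found, or short all_timestamps
-- with every found index small) on which A and B in fact agree — see claim cites.
def Pre_extract_features_from_sensors (actions : List String) (unique_actions : List String) (all_actions : List String) (position : Int) (timestamps : List Int) (all_timestamps : List Int) : Prop :=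
  unique_actions = [] ∨
    (all_timestamps ≠ [] ∧
      (position ≤ 0 ∨
        (timestamps ≠ [] ∧ position < (all_actions.length : Int) ∧ position < (all_timestamps.length : Int))))
instance (actions : List String) (unique_actions : List String) (all_actions : List String) (position : Int) (timestamps : List Int) (all_timestamps : List Int) : Decidable (Pre_extract_features_from_sensors actions unique_actions all_actions position timestamps all_timestamps) := by unfold Pre_extract_features_from_sensors; infer_instance

def pvWitness_extract_features_from_sensors : List String × List String × List String × Int × List Int × List Int :=
  (["a"], ["a", "b"], ["x", "a"], 1, [3], [0, 2])

def Spec_extract_features_from_sensors (actions : List String) (unique_actions : List String) (all_actions : List String) (position : Int) (timestamps : List Int) (all_timestamps : List Int) (out : List Int) : Prop := out = extract_features_from_sensors_alt actions unique_actions all_actions position timestamps all_timestamps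
instance (actions : List String) (unique_actions : List String) (all_actions : List String) (position : Int) (timestamps : List Int) (all_timestamps : List Int) (out : List Int) : Decidable (Spec_extract_features_from_sensors actions unique_actions all_actions position timestamps all_timestamps out) := by unfold Spec_extract_features_from_sensors; infer_instance

-- ===== CLAIM (what is proved, stated in full; the proofs are below) =====
def Claim_equal_extract_features_from_sensors : Prop := ∀ (actions : List String) (unique_actions : List String) (all_actions : List String) (position : Int) (timestamps : List Int) (all_timestamps : List Int), Dom_extract_features_from_sensors actions unique_actions all_actions position timestamps all_timestamps → Pre_extract_features_from_sensors actions unique_actions all_actions position timestamps all_timestamps → Spec_extract_features_from_sensors actions unique_actions all_actions position timestamps all_timestamps (extract_features_from_sensors actions unique_actions all_actions position timestamps all_timestamps)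

-- ===== LEMMAS AND PROOFS =====

-- first (0-based) index of a in w: what B's setdefault loop stores for a
def pvFirstIdx : List String → String → Option Nat
  | [], _ => none
  | x :: xs, a => if x == a then some 0 else (pvFirstIdx xs a).map (· + 1)

theorem pvFirstIdx_getElem? (w : List String) (a : String) (j : Nat)
    (h : pvFirstIdx w a = some j) : w[j]? = some a := by
  induction w generalizing j with
  | nil => simp [pvFirstIdx] at h
  | cons x xs ih =>
    by_cases hx : x == a
    · simp [pvFirstIdx, hx] at h
      subst h
      simpa using (beq_iff_eq.mp hx)
    · simp [pvFirstIdx, hx] at h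
      obtain ⟨j', hj', rfl⟩ := h
      simpa using ih j' hj'

theorem pvFirstIdx_isSome_of_mem (w : List String) (a : String) (h : a ∈ w) :
    (pvFirstIdx w a).isSome := by
  induction w with
  | nil => simp at h
  | cons x xs ih =>
    by_cases hx : x == a
    · simp [pvFirstIdx, hx]
    · have : a ∈ xs := by
        rcases List.mem_cons.mp h with h1 | h1
        · exact absurd (beq_iff_eq.mpr h1.symm) hx
        · exact h1
      have := ih this
      simp [pvFirstIdx, hx]
      cases hf : pvFirstIdx xs a <;> simp [hf] at this ⊢

-- B's setdefault loop: the dict maps a to (start offset +) a's first index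
theorem pvSetdefault_fold_get? (w : List String) (s : Int) (d : PySem.Dict String Int) (a : String) :
    ((PySem.List.enumerate w s).foldl (fun d p => d.setdefault p.2 p.1) d).get? a
      = (d.get? a).or ((pvFirstIdx w a).map (fun j => s + (j : Int))) := by
  induction w generalizing s d with
  | nil => simp [PySem.List.enumerate_nil, pvFirstIdx]
  | cons x xs ih =>
    rw [PySem.List.enumerate_cons, List.foldl_cons, ih]
    simp only []
    by_cases hx : x == a
    · have hax : x = a := beq_iff_eq.mp hx
      subst hax
      rw [PySem.Dict.get?_setdefault_self]
      simp only [pvFirstIdx, BEq.rfl, if_true]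
      cases d.get? x <;> simp
    · have hax : a ≠ x := fun e => hx (beq_iff_eq.mpr e.symm)
      rw [PySem.Dict.get?_setdefault_of_ne d s hax]
      simp only [pvFirstIdx, hx]
      cases hf : pvFirstIdx xs a with
      | none => simp
      | some j =>
        have e : s + 1 + (j : Int) = s + ((j : Int) + 1) := by ring
        simp [e]

-- length is preserved by any pySetD-scatter loop
theorem pvScatterLen {α : Type} (step : List Int → α → List Int)
    (hstep : ∀ es x, (step es x).length = es.length) (l : List α) :
    ∀ es : List Int, (l.foldl step es).length = es.length := by
  induction l with
  | nil => intro es; rfl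
  | cons x xs ih => intro es; rw [List.foldl_cons, ih, hstep]

-- B's count-scatter loop, read at slot j
theorem pvScatterCount (f : String → Option Int) (acts : List String) :
    ∀ (cs : List Int) (j : Nat)
      (hf : ∀ a i, f a = some i → 0 ≤ i ∧ i < (cs.length : Int)),
    (acts.foldl (fun cs a =>
        match f a with
        | none => cs
        | some i => PySem.List.pySetD cs i (PySem.List.pyGetD cs i 0 + 1)) cs).getD j 0
      = cs.getD j 0 + (acts.countP (fun a => f a == some (j : Int)) : Int) := by
  induction acts with
  | nil => intro cs j hf; simp
  | cons a rest ih =>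
    intro cs j hf
    rw [List.foldl_cons, List.countP_cons]
    cases hfa : f a with
    | none => rw [ih cs j hf]; simp
    | some i =>
      obtain ⟨hi0, hilen⟩ := hf a i hfa
      have hset : PySem.List.pySetD cs i (PySem.List.pyGetD cs i 0 + 1)
          = cs.set i.toNat (cs.getD i.toNat 0 + 1) := by
        rw [PySem.List.pySetD_of_nonneg cs _ hi0, PySem.List.pyGetD_eq_getElem cs 0 hi0 hilen,
          List.getD_eq_getElem?_getD, List.getElem?_eq_getElem (by omega)]
        rfl
      have hlen : (cs.set i.toNat (cs.getD i.toNat 0 + 1)).length = cs.length := by simp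
      simp only [hset]
      rw [ih _ j (by rw [hlen]; exact hf)]
      by_cases hij : i = ((j : Nat) : Int)
      · rw [if_pos (by simp [hij])]
        have hij' : i.toNat = j := by omega
        have hjl : (j : Nat) < cs.length := by omega
        have hgd : (cs.set i.toNat (cs.getD i.toNat 0 + 1)).getD j 0 = cs.getD j 0 + 1 := by
          rw [hij']
          simp [List.getD_eq_getElem?_getD, hjl]
        rw [hgd]; push_cast; ring
      · rw [if_neg (by simp [hij])]
        have hij' : (j : Nat) ≠ i.toNat := by omega
        have hgd : (cs.set i.toNat (cs.getD i.toNat 0 + 1)).getD j 0 = cs.getD j 0 := by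
          simp [List.getD_eq_getElem?_getD, Ne.symm hij']
        rw [hgd]; simp

-- B's elapsed-scatter loop over range(1, m+1), read at u's slot j: last write wins, which is
-- exactly A's downward first hit pvWhileFind
theorem pvScatterLast (f : String → Option Int) (aa : List String) (T : Int) (ats : List Int)
    (u : String) (j : Nat) (hu : f u = some (j : Int))
    (hinj : ∀ a, f a = some (j : Int) → a = u) :
    ∀ (m : Nat) (es : List Int) (hj : j < es.length)
      (hf : ∀ a i, f a = some i → 0 ≤ i),
    ((PySem.List.pyRange 1 ((m : Int) + 1) 1).foldl (fun es i =>
        match f (PySem.List.pyGetD aa i "") with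
        | none => es
        | some k => PySem.List.pySetD es k (T - PySem.List.pyGetD ats i 0)) es).getD j 0
      = match pvWhileFind aa u m with
        | some i => T - PySem.List.pyGetD ats ((i : Nat) : Int) 0
        | none => es.getD j 0 := by
  intro m
  induction m with
  | zero =>
    intro es hj hf
    rw [show ((0 : Nat) : Int) + 1 = 1 from by norm_num,
      PySem.List.pyRange_one_eq_nil (le_refl 1)]
    simp [pvWhileFind]
  | succ k ih =>
    intro es hj hf
    have hsplit : PySem.List.pyRange 1 ((k : Nat) + 1 + 1 : Int) 1
        = PySem.List.pyRange 1 ((k : Nat) + 1 : Int) 1 ++ [((k : Nat) + 1 : Int)] := by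
      exact_mod_cast PySem.List.pyRange_one_succ_right (a := 1) (b := ((k : Nat) + 1 : Int)) (by omega)
    have hcast : (((k : Nat) + 1 : Nat) : Int) + 1 = ((k : Nat) + 1 + 1 : Int) := by push_cast; ring
    rw [hcast, hsplit, List.foldl_append, List.foldl_cons, List.foldl_nil]
    set F := (PySem.List.pyRange 1 ((k : Nat) + 1 : Int) 1).foldl (fun es i =>
        match f (PySem.List.pyGetD aa i "") with
        | none => es
        | some k => PySem.List.pySetD es k (T - PySem.List.pyGetD ats i 0)) es with hF
    have hlen : F.length = es.length := by
      rw [hF]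
      apply pvScatterLen
      intro es' x
      cases hx : f (PySem.List.pyGetD aa x "") with
      | none => rfl
      | some v =>
        have := hf _ _ hx
        simp [PySem.List.pySetD_of_nonneg _ _ this]
    simp only [pvWhileFind]
    by_cases hux : u == PySem.List.pyGetD aa ((k : Int) + 1) ""
    · have hx : PySem.List.pyGetD aa ((k : Int) + 1) "" = u := (beq_iff_eq.mp hux).symm
      simp only [hx, hu]
      rw [PySem.List.pySetD_of_nonneg _ _ (by positivity)]
      have hjt : ((j : Int)).toNat = j := by omega
      have hjl : j < F.length := by rw [hlen]; omega
      rw [hjt]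
      simp [List.getD_eq_getElem?_getD, hjl]
    · simp only [hux]
      cases hx : f (PySem.List.pyGetD aa ((k : Int) + 1) "") with
      | none => exact ih es hj hf
      | some v =>
        have hv0 : 0 ≤ v := hf _ _ hx
        have hvj : v ≠ (j : Int) := by
          intro e
          rw [e] at hx
          have := hinj _ hx
          rw [this] at hux
          simp at hux
        simp only [hx]
        rw [PySem.List.pySetD_of_nonneg _ _ hv0]
        have hne : j ≠ v.toNat := by omega
        have hgd : (F.set v.toNat (T - PySem.List.pyGetD ats ((k : Int) + 1) 0)).getD j 0
            = F.getD j 0 := by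
          simp [List.getD_eq_getElem?_getD, Ne.symm hne]
        rw [hgd]
        exact ih es hj hf

-- the fold body of A's second loop, and the fact that it appends exactly one feature per action,
-- independent of found_actions (an action in found_actions is always re-found)
def pvStepA (all_actions : List String) (n : Nat) (tgt : Nat → Int) (maxv : Int)
    (st : List Int × List String) (action : String) : List Int × List String :=
  let st' :=
    match pvWhileFind all_actions action n with
    | some i => (st.1 ++ [tgt i], st.2 ++ [action])
    | none => st
  if st'.2.contains action then st' else (st'.1 ++ [maxv], st'.2)

theorem pvElapsedLoop (all_actions : List String) (n : Nat) (tgt : Nat → Int) (maxv : Int)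
    (ua : List String) (fs : List Int) (found : List String)
    (hinv : ∀ x ∈ found, (pvWhileFind all_actions x n).isSome) :
    (ua.foldl (pvStepA all_actions n tgt maxv) (fs, found)).1
      = fs ++ ua.map (fun a => match pvWhileFind all_actions a n with
                               | some i => tgt i
                               | none => maxv) := by
  induction ua generalizing fs found with
  | nil => simp
  | cons a rest ih =>
    rw [List.foldl_cons]
    cases h : pvWhileFind all_actions a n with
    | some i =>
      have hFa : pvStepA all_actions n tgt maxv (fs, found) a = (fs ++ [tgt i], found ++ [a]) := by
        simp [pvStepA, h]
      have hinv' : ∀ x ∈ found ++ [a], (pvWhileFind all_actions x n).isSome := by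
        intro x hx
        rcases List.mem_append.mp hx with hx | hx
        · exact hinv x hx
        · simp at hx; subst hx; rw [h]; rfl
      rw [hFa, ih _ _ hinv']
      simp [h]
    | none =>
      have ha : a ∉ found := by
        intro hm
        have := hinv a hm; rw [h] at this; simp at this
      have hFa : pvStepA all_actions n tgt maxv (fs, found) a = (fs ++ [maxv], found) := by
        simp [pvStepA, h, ha]
      rw [hFa, ih _ _ hinv]
      simp [h]

theorem pvCountLoop (a : String) (l : List String) (c0 : Int) :
    l.foldl (fun c x => if a == x then c + 1 else c) c0 = c0 + (l.count a : Int) := by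
  induction l generalizing c0 with
  | nil => simp
  | cons x xs ih =>
    simp only [List.foldl_cons, List.count_cons, ih]
    by_cases h : a = x
    · simp [h]; ring
    · have h1 : (a == x) = false := by simp [h]
      have h2 : (x == a) = false := by
        simp only [beq_eq_false_iff_ne, ne_eq]
        intro e; exact h e.symm
      simp [h1, h2]

-- xs[len(xs)-1] and xs[-1] coincide under pyGetD (both default on [])
theorem pvGetD_last (xs : List Int) :
    PySem.List.pyGetD xs ((xs.length : Int) - 1) 0 = PySem.List.pyGetD xs (-1) 0 := by
  cases xs with
  | nil => rfl
  | cons x xs' =>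
    have h : (x :: xs') ≠ [] := by simp
    have hlen : 1 ≤ (x :: xs').length := by simp
    have h1 : (((x :: xs').length : Int) - 1) = (((x :: xs').length - 1 : Nat) : Int) := by
      push_cast [hlen]; ring
    rw [h1, PySem.List.pyGetD_natCast, PySem.List.pyGetD_neg_one _ 0 h,
        List.getLast_eq_getElem, List.getD_eq_getElem?_getD,
        List.getElem?_eq_getElem (by omega)]
    rfl

-- ===== VERDICT (by name: the statement is the Claim_ definition above) =====
theorem extract_features_from_sensors_spec : Claim_equal_extract_features_from_sensors := by
  intro actions ua aa pos ts ats _dom hpre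
  unfold Spec_extract_features_from_sensors
  rcases hpre with hua | ⟨_hats, _hcase⟩
  · subst hua; rfl
  by_cases hua : ua = []
  · subst hua; rfl
  have hn0 : ¬ ua.length = 0 := by simpa using hua
  -- A's two loops in canonical form: a map of counts, then a map of elapsed features
  have hA1 : extract_features_from_sensors actions ua aa pos ts ats
      = (ua.foldl (pvStepA aa pos.toNat
          (fun i => PySem.List.pyGetD ts ((ts.length : Int) - 1) 0
                      - PySem.List.pyGetD ats ((i : Nat) : Int) 0)
          (PySem.List.pyGetD ats ((ats.length : Int) - 1) 0 - PySem.List.pyGetD ats 0 0))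
          (ua.foldl (fun fs action =>
            fs ++ [actions.foldl (fun c af => if action == af then c + 1 else c) (0 : Int)]) [],
           ([] : List String))).1 := rfl
  rw [hA1, pvElapsedLoop aa pos.toNat _ _ ua _ [] (by intro x hx; simp at hx),
    PySem.List.foldl_append_singleton_eq_map, List.nil_append]
  simp only [pvCountLoop, zero_add, pvGetD_last]
  -- B's slot dict maps each unique action to its first index
  set slot : PySem.Dict String Int :=
    (PySem.List.enumerate ua 0).foldl (fun d p => d.setdefault p.2 p.1) PySem.Dict.empty
    with hslotdef
  have hslot : ∀ a, slot.get? a = (pvFirstIdx ua a).map (fun j => ((j : Nat) : Int)) := by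
    intro a
    rw [hslotdef, pvSetdefault_fold_get?]
    simp [PySem.Dict.get?_empty]
    cases pvFirstIdx ua a <;> rfl
  have hfbound : ∀ a i, slot.get? a = some i → 0 ≤ i ∧ i < (ua.length : Int) := by
    intro a i h
    rw [hslot] at h
    cases hfa : pvFirstIdx ua a with
    | none => rw [hfa] at h; simp at h
    | some j' =>
      rw [hfa] at h
      simp at h
      obtain ⟨hlt, _⟩ := List.getElem?_eq_some_iff.mp (pvFirstIdx_getElem? ua a j' hfa)
      omega
  have hB1 : extract_features_from_sensors_alt actions ua aa pos ts ats
      = ua.map (fun u => PySem.List.pyGetD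
            (actions.foldl (fun (cs : List Int) a =>
              match slot.get? a with
              | none => cs
              | some j => PySem.List.pySetD cs j (PySem.List.pyGetD cs j 0 + 1))
              (List.replicate ua.length (0 : Int))) (slot.getD u 0) 0)
        ++ ua.map (fun u => PySem.List.pyGetD
            ((PySem.List.pyRange 1 (pos + 1) 1).foldl (fun (es : List Int) i =>
              match slot.get? (PySem.List.pyGetD aa i "") with
              | none => es
              | some j => PySem.List.pySetD es j
                  (PySem.List.pyGetD ts (-1) 0 - PySem.List.pyGetD ats i 0))
              (List.replicate ua.length
                (PySem.List.pyGetD ats (-1) 0 - PySem.List.pyGetD ats 0 0)))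
            (slot.getD u 0) 0) := by
    unfold extract_features_from_sensors_alt
    simp only [← hslotdef, if_neg hn0]
  rw [hB1]
  -- the window range with an Int bound equals the one with the Nat bound
  have hrange : PySem.List.pyRange 1 (pos + 1) 1 = PySem.List.pyRange 1 ((pos.toNat : Int) + 1) 1 := by
    by_cases hp : 0 ≤ pos
    · congr 1; omega
    · rw [PySem.List.pyRange_one_eq_nil (by omega), PySem.List.pyRange_one_eq_nil (by omega)]
  congr 1
  -- counts
  · apply List.map_congr_left
    intro u hu
    obtain ⟨j, hj⟩ := Option.isSome_iff_exists.mp (pvFirstIdx_isSome_of_mem ua u hu)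
    have hget : slot.get? u = some ((j : Nat) : Int) := by rw [hslot, hj]; rfl
    have hgd : slot.getD u 0 = ((j : Nat) : Int) := by
      rw [show slot.getD u 0 = (slot.get? u).getD 0 from rfl, hget]; rfl
    rw [hgd, PySem.List.pyGetD_natCast,
      pvScatterCount slot.get? actions (List.replicate ua.length 0) j (by simpa using hfbound)]
    have hrepl : (List.replicate ua.length (0 : Int)).getD j 0 = 0 := by
      simp [List.getD_eq_getElem?_getD]
    rw [hrepl, zero_add]
    have hpt : ∀ x, (slot.get? x == some ((j : Nat) : Int)) = (x == u) := by
      intro x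
      by_cases hxu : x = u
      · simp [hxu, hget]
      · have hne : slot.get? x ≠ some ((j : Nat) : Int) := by
          intro h
          obtain ⟨hlt, hval⟩ := List.getElem?_eq_some_iff.mp (pvFirstIdx_getElem? ua u j hj)
          rw [hslot] at h
          cases hfa : pvFirstIdx ua x with
          | none => rw [hfa] at h; simp at h
          | some j' =>
            rw [hfa] at h
            simp at h
            rw [h] at hfa
            obtain ⟨_, hval'⟩ := List.getElem?_eq_some_iff.mp (pvFirstIdx_getElem? ua x j hfa)
            exact hxu (hval'.symm.trans hval)
        simp [hne, hxu]
    have : actions.countP (fun a => slot.get? a == some ((j : Nat) : Int))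
        = actions.count u := List.countP_congr (by intro x _; rw [hpt x])
    rw [this]
  -- elapsed
  · apply List.map_congr_left
    intro u hu
    obtain ⟨j, hj⟩ := Option.isSome_iff_exists.mp (pvFirstIdx_isSome_of_mem ua u hu)
    have hget : slot.get? u = some ((j : Nat) : Int) := by rw [hslot, hj]; rfl
    have hgd : slot.getD u 0 = ((j : Nat) : Int) := by
      rw [show slot.getD u 0 = (slot.get? u).getD 0 from rfl, hget]; rfl
    have hjlt : j < ua.length :=
      (List.getElem?_eq_some_iff.mp (pvFirstIdx_getElem? ua u j hj)).1
    have hinj : ∀ a, slot.get? a = some ((j : Nat) : Int) → a = u := by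
      intro a ha
      obtain ⟨_, hval⟩ := List.getElem?_eq_some_iff.mp (pvFirstIdx_getElem? ua u j hj)
      rw [hslot] at ha
      cases hfa : pvFirstIdx ua a with
      | none => rw [hfa] at ha; simp at ha
      | some j' =>
        rw [hfa] at ha
        simp at ha
        rw [ha] at hfa
        obtain ⟨_, hval'⟩ := List.getElem?_eq_some_iff.mp (pvFirstIdx_getElem? ua a j hfa)
        exact hval'.symm.trans hval
    rw [hgd, PySem.List.pyGetD_natCast, hrange,
      pvScatterLast slot.get? aa (PySem.List.pyGetD ts (-1) 0) ats u j hget hinj pos.toNat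
        (List.replicate ua.length (PySem.List.pyGetD ats (-1) 0 - PySem.List.pyGetD ats 0 0))
        (by simpa using hjlt) (fun a i h => (hfbound a i h).1)]
    have hrepl : (List.replicate ua.length
        (PySem.List.pyGetD ats (-1) 0 - PySem.List.pyGetD ats 0 0)).getD j 0
        = PySem.List.pyGetD ats (-1) 0 - PySem.List.pyGetD ats 0 0 := by
      simp [List.getD_eq_getElem?_getD, hjlt]
    rw [hrepl]
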